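-- pv_equiv track=rewrite | github.com/mittal-umang/Analytics | Assignment-2/NumberOccurence.py | occurenceMap
-- ===== SOURCE A (Python) =====
-- def bubble_sort(alist):
--     for i, num in enumerate(alist):
--         try:
--             if alist[i + 1] < num:
--                 alist[i] = alist[i + 1]
--                 alist[i + 1] = num
--                 bubble_sort(alist)
--         except IndexError:
--             pass
--
-- def occurenceMap(alist):
--     i = 0
--     occurenceMap = {}
--     bubble_sort(alist)
--     while i < len(alist):
--         count = alist.count(alist[i])
--         occurenceMap.update({alist[i]: count})
--         i += 1
--     return occurenceMap
-- ===== SOURCE B (Python) =====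
-- def occurenceMap(alist):
--     alist.sort()
--     out = {}
--     if not alist:
--         return out
--     prev = alist[0]
--     count = 1
--     for x in alist[1:]:
--         if x == prev:
--             count += 1
--         else:
--             out[prev] = count
--             prev = x
--             count = 1
--     out[prev] = count
--     return out
-- ===== Notes on version B (the rewrite author's own statement) =====
-- stated objective: faster
-- what changed: Replaces the restart-on-swap recursive bubble sort plus a per-index full-list count() rescan with list.sort() followed by a single run-length grouping pass over the sorted list (track current value and running count, emit on change).
import Mathlib
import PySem

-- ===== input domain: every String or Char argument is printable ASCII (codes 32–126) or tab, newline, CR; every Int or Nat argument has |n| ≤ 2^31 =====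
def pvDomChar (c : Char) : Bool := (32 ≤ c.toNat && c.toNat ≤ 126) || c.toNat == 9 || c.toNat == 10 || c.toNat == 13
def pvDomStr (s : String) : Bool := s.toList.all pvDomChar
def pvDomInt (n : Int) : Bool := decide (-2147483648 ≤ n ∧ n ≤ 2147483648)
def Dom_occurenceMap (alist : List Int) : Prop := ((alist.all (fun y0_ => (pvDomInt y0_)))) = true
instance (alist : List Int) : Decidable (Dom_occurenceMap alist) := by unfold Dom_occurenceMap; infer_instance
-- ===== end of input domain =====

-- B replaces A's restart-on-swap bubble sort + per-index full count() rescans by sort + one run-length grouping pass (faster).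
-- Both Pythons mutate alist in place (they sort it); the equivalence proved here is about the return value.

-- ===== PORT A =====
-- inversion count of a list: supplies fuel for the recursive bubble sort (the recursion provably never exhausts it)
def pvInv : List Int → Nat
  | [] => 0
  | x :: xs => xs.countP (fun y => decide (y < x)) + pvInv xs

-- 'for i, num in enumerate(alist): if alist[i+1] < num: swap; bubble_sort(alist)', the IndexError at the last
-- index caught and ignored ('except IndexError: pass'); fuel only makes the nested recursion structural
def pvBubbleAux : Nat → List Int → Nat → List Int
  | 0, l, _ => l
  | fuel + 1, l, i =>
    if h : i + 1 < l.length then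
      let num := l[i]'(Nat.lt_of_succ_lt h)
      if l[i + 1] < num then
        let l' := (l.set i l[i + 1]).set (i + 1) num
        pvBubbleAux fuel (pvBubbleAux fuel l' 0) (i + 1)
      else
        pvBubbleAux fuel l (i + 1)
    else l

def pvBubbleSort (l : List Int) : List Int :=
  pvBubbleAux (pvInv l * (l.length + 1) + l.length + 1) l 0

-- 'while i < len(alist): count = alist.count(alist[i]); occurenceMap.update({alist[i]: count}); i += 1'
def pvWhileLoop (s : List Int) (d : PySem.Dict Int Int) (i : Nat) : PySem.Dict Int Int :=
  if h : i < s.length then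
    pvWhileLoop s (d.insert s[i] ((PySem.List.count s s[i] : Int))) (i + 1)
  else d
termination_by s.length - i

def occurenceMap (alist : List Int) : List (Int × Int) :=
  (pvWhileLoop (pvBubbleSort alist) PySem.Dict.empty 0).items

-- ===== PORT B =====
-- the grouping pass of Source B: prev/count accumulator, 'out[prev] = count' on each value change and at the end
def pvAltLoop : List Int → Int → Int → PySem.Dict Int Int → PySem.Dict Int Int
  | [], prev, count, out => out.insert prev count
  | x :: xs, prev, count, out =>
    if x = prev then pvAltLoop xs prev (count + 1) out
    else pvAltLoop xs x 1 (out.insert prev count)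

def occurenceMap_alt (alist : List Int) : List (Int × Int) :=
  match PySem.List.sorted alist (fun x => x) false with
  | [] => []
  | p :: xs => (pvAltLoop xs p 1 PySem.Dict.empty).items

-- ===== PRECONDITION & SPEC =====
def Spec_occurenceMap (alist : List Int) (out : List (Int × Int)) : Prop := out = occurenceMap_alt alist
instance (alist : List Int) (out : List (Int × Int)) : Decidable (Spec_occurenceMap alist out) := by unfold Spec_occurenceMap; infer_instance

-- ===== CLAIM (what is proved, stated in full; the proofs are below) =====
def Claim_equal_occurenceMap : Prop := ∀ (alist : List Int), Dom_occurenceMap alist → Spec_occurenceMap alist (occurenceMap alist)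

-- ===== LEMMAS AND PROOFS =====
-- canonical sorted form (Python sorted == list.sort order on ints)
def pvSSort (l : List Int) : List Int := PySem.List.sorted l (fun x => x) false

-- adjacent dedup after a first element: the distinct values of a sorted tail
def pvDedupAdjFrom (prev : Int) : List Int → List Int
  | [] => []
  | x :: xs => if x = prev then pvDedupAdjFrom prev xs else x :: pvDedupAdjFrom x xs

lemma pvInv_zero_of_pairwise (l : List Int) (h : l.Pairwise (· ≤ ·)) : pvInv l = 0 := by
  induction l with
  | nil => rfl
  | cons x xs ih =>
    rw [List.pairwise_cons] at h
    simp [pvInv, ih h.2, List.countP_eq_zero]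
    intro y hy
    exact h.1 y hy

lemma pvInv_append (p m : List Int) :
    pvInv (p ++ m) = pvInv p + (p.map (fun h => m.countP (fun y => decide (y < h)))).sum + pvInv m := by
  induction p with
  | nil => simp [pvInv]
  | cons x xs ih =>
    simp [pvInv, List.countP_append, ih]
    ring

lemma pvInv_middle_swap (p r : List Int) (a b : Int) (hba : b < a) :
    pvInv (p ++ b :: a :: r) + 1 = pvInv (p ++ a :: b :: r) := by
  rw [pvInv_append, pvInv_append]
  have hm : (p.map (fun h => ((b :: a :: r).countP (fun y => decide (y < h))))).sum
      = (p.map (fun h => ((a :: b :: r).countP (fun y => decide (y < h))))).sum := by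
    congr 1
    apply List.map_congr_left
    intro h _
    simp only [List.countP_cons]
    ring
  rw [hm]
  have h2 : pvInv (b :: a :: r) + 1 = pvInv (a :: b :: r) := by
    simp only [pvInv, List.countP_cons, decide_eq_true_eq]
    have h3 : ¬ a < b := not_lt.2 hba.le
    simp [h3, hba]
    omega
  omega

lemma pvDecomp (l : List Int) (i : Nat) (h : i + 1 < l.length) :
    l = l.take i ++ (l[i]'(by omega)) :: l[i+1] :: l.drop (i + 2) := by
  have h1 : l.drop i = (l[i]'(by omega)) :: l.drop (i+1) := List.drop_eq_getElem_cons (by omega)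
  have h2 : l.drop (i+1) = l[i+1] :: l.drop (i+2) := List.drop_eq_getElem_cons (by omega)
  conv_lhs => rw [← List.take_append_drop i l, h1, h2]

lemma pvSwapDecomp (l : List Int) (i : Nat) (h : i + 1 < l.length) :
    (l.set i (l[i+1])).set (i + 1) (l[i]'(by omega))
      = l.take i ++ l[i+1] :: (l[i]'(by omega)) :: l.drop (i + 2) := by
  have hs1 : l.set i (l[i+1]) = l.take i ++ l[i+1] :: l.drop (i+1) :=
    List.set_eq_take_cons_drop _ (by omega)
  have hlt : (l.take i).length = i := by simp; omega
  have h2 : l.drop (i+1) = l[i+1]'(h) :: l.drop (i+2) := List.drop_eq_getElem_cons (by omega)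
  rw [hs1, List.set_append_right _ _ (by omega), hlt]
  have : (l[i+1] :: l.drop (i+1)).set (i + 1 - i) (l[i]'(by omega))
      = l[i+1] :: (l.drop (i+1)).set 0 (l[i]'(by omega)) := by
    have : i + 1 - i = 1 := by omega
    rw [this]
    rfl
  rw [this, h2]
  rfl

-- main bubble-sort lemma: given enough fuel and an already-sorted prefix, the loop returns the sorted list
lemma pvBubbleAux_eq : ∀ (fuel : Nat) (l : List Int) (i : Nat),
    (∀ j, j + 1 ≤ i → (hj : j + 1 < l.length) → l[j]'(by omega) ≤ l[j+1]) →
    pvInv l * (l.length + 1) + (l.length - i) + 1 ≤ fuel →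
    pvBubbleAux fuel l i = pvSSort l
  | 0, l, i, hpre, hf => by omega
  | fuel + 1, l, i, hpre, hf => by
    simp only [pvBubbleAux]
    split
    case isTrue h =>
      by_cases hlt : l[i + 1] < l[i]'(Nat.lt_of_succ_lt h)
      · rw [if_pos hlt]
        have hd : l = l.take i ++ (l[i]'(by omega)) :: l[i+1] :: l.drop (i + 2) := pvDecomp l i h
        have hd' : (l.set i (l[i+1])).set (i + 1) (l[i]'(by omega))
            = l.take i ++ l[i+1] :: (l[i]'(by omega)) :: l.drop (i + 2) := pvSwapDecomp l i h
        set l' := (l.set i (l[i+1])).set (i + 1) (l[i]'(by omega)) with hl'def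
        have hlen' : l'.length = l.length := by simp [hl'def]
        have hperm : l'.Perm l := by
          rw [hd']
          conv_rhs => rw [hd]
          exact List.Perm.append_left _ (List.Perm.swap _ _ _)
        have hinv : pvInv l' + 1 = pvInv l := by
          rw [hd']
          conv_rhs => rw [hd]
          exact pvInv_middle_swap _ _ _ _ hlt
        have h1 : pvBubbleAux fuel l' 0 = pvSSort l' := by
          apply pvBubbleAux_eq
          · intro j hj _; omega
          · rw [hlen']
            have hmul : pvInv l * (l.length + 1) = pvInv l' * (l.length + 1) + (l.length + 1) := by
              rw [← hinv]; ring
            rw [hmul] at hf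
            omega
        rw [h1]
        have hsp : (pvSSort l').Pairwise (· ≤ ·) := PySem.List.sorted_pairwise l' (fun x => x) ..
        have hsperm : (pvSSort l').Perm l' := PySem.List.sorted_perm ..
        have hslen : (pvSSort l').length = l.length := by rw [hsperm.length_eq, hlen']
        have h2 : pvBubbleAux fuel (pvSSort l') (i + 1) = pvSSort (pvSSort l') := by
          apply pvBubbleAux_eq
          · intro j _ hj
            exact List.pairwise_iff_getElem.mp hsp j (j+1) (by omega) (by omega) (by omega)
          · rw [pvInv_zero_of_pairwise _ hsp, hslen]
            have hnz : 1 ≤ pvInv l := by omega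
            have : l.length + 1 ≤ pvInv l * (l.length + 1) := by
              calc l.length + 1 = 1 * (l.length + 1) := by ring
                _ ≤ pvInv l * (l.length + 1) := Nat.mul_le_mul_right _ hnz
            omega
        rw [h2]
        unfold pvSSort
        rw [PySem.List.sorted_sorted]
        exact PySem.List.sorted_eq_sorted_of_perm l' l (fun x => x) (fun a b hab => hab) hperm
      · rw [if_neg hlt]
        apply pvBubbleAux_eq
        · intro j hj hjl
          rcases Nat.lt_or_ge (j + 1) (i + 1) with hji | hji
          · exact hpre j (by omega) hjl
          · have : j = i := by omega
            subst this
            exact not_lt.1 hlt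
        · have : l.length - (i + 1) + 1 = l.length - i := by omega
          omega
    case isFalse h =>
      have hp : l.Pairwise (· ≤ ·) := by
        rw [← List.isChain_iff_pairwise, List.isChain_iff_getElem]
        intro j hj
        exact hpre j (by omega) hj
      exact (PySem.List.sorted_id_eq_of_perm_of_pairwise l l (List.Perm.refl l) hp).symm

lemma pvWhileLoop_eq_foldl (s : List Int) (d : PySem.Dict Int Int) (i : Nat) :
    pvWhileLoop s d i
      = (s.drop i).foldl (fun d x => d.insert x ((PySem.List.count s x : Int))) d := by
  rw [pvWhileLoop]
  split
  case isTrue h =>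
    rw [pvWhileLoop_eq_foldl s _ (i + 1), List.drop_eq_getElem_cons h, List.foldl_cons]
  case isFalse h =>
    rw [List.drop_eq_nil_iff.2 (by omega), List.foldl_nil]
termination_by s.length - i

-- A's counting loop over the sorted list, after the first key has been inserted
lemma pvFoldl_insert_items (cnt : Int → Int) (xs : List Int) :
    ∀ (prev : Int) (d : PySem.Dict Int Int),
      (prev :: xs).IsChain (· ≤ ·) →
      d.contains prev = false →
      (∀ k ∈ d.keys, ∀ x ∈ prev :: xs, k ≠ x) →
      (xs.foldl (fun d x => d.insert x (cnt x)) (d.insert prev (cnt prev))).items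
        = d.items ++ (prev, cnt prev) :: (pvDedupAdjFrom prev xs).map (fun k => (k, cnt k)) := by
  induction xs with
  | nil =>
    intro prev d _ hc _
    simp [pvDedupAdjFrom, PySem.Dict.items_insert_of_not_contains _ _ hc]
  | cons x rest ih =>
    intro prev d hch hc hkeys
    rcases List.isChain_cons_cons.mp hch with ⟨hpx, hchx⟩
    by_cases hx : x = prev
    · subst hx
      rw [List.foldl_cons, PySem.Dict.insert_insert_self]
      rw [ih x d hchx hc (fun k hk y hy => hkeys k hk y (by
        rcases List.mem_cons.mp hy with rfl | hy'
        · exact List.mem_cons_self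
        · exact List.mem_cons_of_mem _ (List.mem_cons_of_mem _ hy')))]
      simp [pvDedupAdjFrom]
    · have hpltx : prev < x := lt_of_le_of_ne hpx (fun e => hx e.symm)
      have hrest : ∀ y ∈ rest, x ≤ y := by
        have := List.isChain_iff_pairwise.mp hchx
        rw [List.pairwise_cons] at this
        exact this.1
      have hxnotk : x ∉ d.keys := fun hm => hkeys x hm x (by simp) rfl
      have hcx : (d.insert prev (cnt prev)).contains x = false := by
        rw [PySem.Dict.contains_insert]
        simp only [Bool.or_eq_false_iff]
        constructor
        · simp [hx]
        · rw [← Bool.not_eq_true, PySem.Dict.contains_iff_mem_keys]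
          exact hxnotk
      rw [List.foldl_cons]
      rw [ih x (d.insert prev (cnt prev)) hchx hcx ?keys]
      case keys =>
        intro k hk y hy
        rcases (PySem.Dict.mem_keys_insert _ _ _ _).mp hk with rfl | hk'
        · have : k < y := by
            rcases List.mem_cons.mp hy with rfl | hy'
            · exact hpltx
            · exact lt_of_lt_of_le hpltx (hrest y hy')
          omega
        · exact hkeys k hk' y (List.mem_cons_of_mem _ hy)
      rw [PySem.Dict.items_insert_of_not_contains _ _ hc]
      simp [pvDedupAdjFrom, hx]

-- B's grouping pass over the sorted list
lemma pvAltLoop_items (cnt : Int → Int) (xs : List Int) :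
    ∀ (prev : Int) (c : Int) (d : PySem.Dict Int Int),
      (prev :: xs).IsChain (· ≤ ·) →
      d.contains prev = false →
      (∀ k ∈ d.keys, ∀ x ∈ prev :: xs, k ≠ x) →
      c + (xs.count prev : Int) = cnt prev →
      (∀ v ∈ xs, v ≠ prev → ((xs.count v : Int) = cnt v)) →
      (pvAltLoop xs prev c d).items
        = d.items ++ (prev, cnt prev) :: (pvDedupAdjFrom prev xs).map (fun k => (k, cnt k)) := by
  induction xs with
  | nil =>
    intro prev c d _ hc _ hcount _
    simp at hcount
    simp [pvAltLoop, pvDedupAdjFrom, hcount,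
      PySem.Dict.items_insert_of_not_contains _ _ hc]
  | cons x rest ih =>
    intro prev c d hch hc hkeys hcount hcnts
    rcases List.isChain_cons_cons.mp hch with ⟨hpx, hchx⟩
    simp only [pvAltLoop]
    by_cases hx : x = prev
    · subst hx
      rw [if_pos rfl]
      rw [ih x (c + 1) d hchx hc (fun k hk y hy => hkeys k hk y (by
        rcases List.mem_cons.mp hy with rfl | hy'
        · exact List.mem_cons_self
        · exact List.mem_cons_of_mem _ (List.mem_cons_of_mem _ hy'))) ?cnt ?cnts]
      case cnt =>
        rw [List.count_cons_self] at hcount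
        push_cast at hcount ⊢
        omega
      case cnts =>
        intro v hv hvx
        have := hcnts v (List.mem_cons_of_mem _ hv) hvx
        rwa [List.count_cons_of_ne (by omega)] at this
      simp [pvDedupAdjFrom]
    · rw [if_neg hx]
      have hpltx : prev < x := lt_of_le_of_ne hpx (fun e => hx e.symm)
      have hrest : ∀ y ∈ rest, x ≤ y := by
        have := List.isChain_iff_pairwise.mp hchx
        rw [List.pairwise_cons] at this
        exact this.1
      have hpnot : prev ∉ x :: rest := by
        intro hm
        rcases List.mem_cons.mp hm with e | hm'
        · omega
        · have := hrest prev hm'; omega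
      have hcprev : c = cnt prev := by
        rw [List.count_eq_zero.2 hpnot] at hcount
        simpa using hcount
      have hxnotk : x ∉ d.keys := fun hm => hkeys x hm x (by simp) rfl
      have hcx : (d.insert prev c).contains x = false := by
        rw [PySem.Dict.contains_insert]
        simp only [Bool.or_eq_false_iff]
        constructor
        · simp [hx]
        · rw [← Bool.not_eq_true, PySem.Dict.contains_iff_mem_keys]
          exact hxnotk
      rw [ih x 1 (d.insert prev c) hchx hcx ?keys ?cnt ?cnts]
      case keys =>
        intro k hk y hy
        rcases (PySem.Dict.mem_keys_insert _ _ _ _).mp hk with rfl | hk'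
        · have : k < y := by
            rcases List.mem_cons.mp hy with rfl | hy'
            · exact hpltx
            · exact lt_of_lt_of_le hpltx (hrest y hy')
          omega
        · exact hkeys k hk' y (List.mem_cons_of_mem _ hy)
      case cnt =>
        have := hcnts x List.mem_cons_self hx
        rw [List.count_cons_self] at this
        push_cast at this ⊢
        omega
      case cnts =>
        intro v hv hvx
        have hvp : v ≠ prev := by
          intro e; subst e; exact hpnot (List.mem_cons_of_mem _ hv)
        have := hcnts v (List.mem_cons_of_mem _ hv) hvp
        rwa [List.count_cons_of_ne (by omega)] at this
      rw [PySem.Dict.items_insert_of_not_contains _ _ hc, hcprev]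
      simp [pvDedupAdjFrom, hx]

-- ===== VERDICT (by name: the statement is the Claim_ definition above) =====
theorem occurenceMap_spec : Claim_equal_occurenceMap := by
  intro alist _
  unfold Spec_occurenceMap occurenceMap occurenceMap_alt
  have hsort : pvBubbleSort alist = pvSSort alist := by
    apply pvBubbleAux_eq
    · intro j hj _; omega
    · omega
  rw [hsort, pvWhileLoop_eq_foldl]
  unfold pvSSort
  have hsp : (PySem.List.sorted alist (fun x => x) false).Pairwise (· ≤ ·) :=
    PySem.List.sorted_pairwise alist (fun x => x)
  cases hs : PySem.List.sorted alist (fun x => x) false with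
  | nil => rfl
  | cons p xs =>
    rw [hs] at hsp
    have hch : (p :: xs).IsChain (· ≤ ·) := List.isChain_iff_pairwise.mpr hsp
    have hA := pvFoldl_insert_items (fun k => ((PySem.List.count (p :: xs) k : Nat) : Int))
      xs p PySem.Dict.empty hch (by simp) (by simp [PySem.Dict.keys_empty])
    have hB := pvAltLoop_items (fun k => ((PySem.List.count (p :: xs) k : Nat) : Int))
      xs p 1 PySem.Dict.empty hch (by simp) (by simp [PySem.Dict.keys_empty])
      (by simp only [PySem.List.count_eq, List.count_cons_self]; push_cast; omega)
      (fun v _ hvp => by simp only [PySem.List.count_eq]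
                         rw [List.count_cons_of_ne (by omega)])
    rw [List.drop_zero, List.foldl_cons]
    exact hA.trans hB.symm
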